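-- pv_equiv track=rewrite | github.com/qusba/Pakkausalgoritmi_harjoitustyo | Lempel-Ziv-Welch/LZW_koodaus.py | muuta_tuloste_tekstiksi
-- ===== SOURCE A (Python) =====
-- def muuta_tuloste_tekstiksi(tuloste):
--     """Funktio muuttaa listan kokonaislukuja takaisin tekstiksi. Luo samanlaisen sanakirjan kuin luo_tuloste_pakatessa -funktio,
--     jonka avulla tuloste muutetaan takaisin tekstiksi. Käytännössä luo_tuloste_pakatessa -funktion käänteisfunktio.
--
--     Parametrit:
--         tuloste: [Lista kokonaislukuja.]
--
--     Palauttaa: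
--         lopputulos: [Valmis merkkijono, joka voidaan kirjoittaa tiedostoon.]
--     """
--
--     sanakirja = {}
--     for i in range(256):
--         sanakirja[i] = chr(i)
--
--     uusi_arvo = 256
--     nykyinen = tuloste[0]
--     teksti = sanakirja[nykyinen]
--     lisays = teksti[0]
--
--     for i in range(len(tuloste)-1):
--         uusi = tuloste[i+1]
--         if uusi not in sanakirja:
--             teksti = sanakirja[nykyinen]
--             teksti = teksti + lisays
--         else:
--             teksti = sanakirja[uusi]
--
--         lisays = ""
--         lisays = teksti[0]
--         sanakirja[uusi_arvo] = sanakirja[nykyinen] + lisays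
--         uusi_arvo += 1
--         nykyinen = uusi
--
--     lopputulos = ""
--     for arvo in tuloste:
--         lopputulos += sanakirja[arvo]
--
--     return lopputulos
-- ===== SOURCE B (Python) =====
-- def muuta_tuloste_tekstiksi(tuloste):
--     """Single-pass LZW decode: emit each phrase while the dictionary is built,
--     instead of building the dictionary first and emitting in a second pass."""
--     sanakirja = {i: chr(i) for i in range(256)}
--     nykyinen = tuloste[0]
--     lopputulos = sanakirja[nykyinen]
--     uusi_arvo = 256
--     for arvo in tuloste[1:]:
--         if arvo in sanakirja:
--             lisays = sanakirja[arvo][0]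
--         else:
--             lisays = sanakirja[nykyinen][0]
--         sanakirja[uusi_arvo] = sanakirja[nykyinen] + lisays
--         uusi_arvo += 1
--         lopputulos += sanakirja[arvo]
--         nykyinen = arvo
--     return lopputulos
-- ===== Notes on version B (the rewrite author's own statement) =====
-- stated objective: simpler
-- what changed: A decodes in two passes (a dictionary-building loop carrying teksti/lisays state, then a second pass re-looking every code up in the finished dictionary); B is the standard single-pass LZW decoder that emits each phrase as the dictionary is built, dropping the second pass and the teksti variable.
import Mathlib
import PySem

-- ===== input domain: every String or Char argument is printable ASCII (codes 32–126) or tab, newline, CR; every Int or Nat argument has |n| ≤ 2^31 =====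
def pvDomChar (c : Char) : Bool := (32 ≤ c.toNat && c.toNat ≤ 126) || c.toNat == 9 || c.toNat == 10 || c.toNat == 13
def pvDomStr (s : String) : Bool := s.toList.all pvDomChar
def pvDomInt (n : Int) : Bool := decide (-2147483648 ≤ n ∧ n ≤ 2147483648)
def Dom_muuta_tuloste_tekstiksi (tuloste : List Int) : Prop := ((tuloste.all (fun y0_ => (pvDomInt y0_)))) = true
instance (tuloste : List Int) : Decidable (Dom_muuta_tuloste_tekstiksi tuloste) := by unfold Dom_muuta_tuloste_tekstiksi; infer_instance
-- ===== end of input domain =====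

-- B merges A's two passes (build dictionary, then re-look every code up) into the standard
-- single-pass LZW decoder that emits while building; Python str values are modelled as List Char.

-- ===== PORT A =====
-- chr(i)
def pvChr (i : Int) : List Char := [Char.ofNat i.toNat]

-- sanakirja = {}; for i in range(256): sanakirja[i] = chr(i)   (shared: both Pythons build this dict)
def pvInitDict : PySem.Dict Int (List Char) :=
  (PySem.List.pyRange 0 256 1).foldl (fun d i => d.insert i (pvChr i)) PySem.Dict.empty

-- teksti[0]  (a one-character string; [] where Python raises IndexError — excluded by Pre_)
def pvHead (s : List Char) : List Char :=
  match PySem.List.pyGet? s 0 with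
  | some c => [c]
  | none => []

structure StA where
  teksti : List Char
  lisays : List Char
  sk : PySem.Dict Int (List Char)
  uusi_arvo : Int
  nykyinen : Int
deriving Repr, DecidableEq

-- one iteration of A's first loop, given the value uusi = tuloste[i+1]
def pvStepA' (st : StA) (uusi : Int) : StA :=
  let teksti := if st.sk.contains uusi then st.sk.getD uusi [] else st.sk.getD st.nykyinen [] ++ st.lisays
  let lisays := pvHead teksti
  let sk := st.sk.insert st.uusi_arvo (st.sk.getD st.nykyinen [] ++ lisays)
  ⟨teksti, lisays, sk, st.uusi_arvo + 1, uusi⟩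

-- body of 'for i in range(len(tuloste)-1): uusi = tuloste[i+1]; …'
def pvStepA (tuloste : List Int) (st : StA) (i : Int) : StA :=
  pvStepA' st (PySem.List.pyGetD tuloste (i + 1) 0)

def muuta_tuloste_tekstiksi (tuloste : List Int) : String :=
  let sanakirja := pvInitDict
  let nykyinen := PySem.List.pyGetD tuloste 0 0
  let teksti := sanakirja.getD nykyinen []
  let lisays := pvHead teksti
  let st := (PySem.List.pyRange 0 (PySem.List.len tuloste - 1) 1).foldl (pvStepA tuloste)
      ⟨teksti, lisays, sanakirja, 256, nykyinen⟩
  let lopputulos := tuloste.foldl (fun acc arvo => acc ++ st.sk.getD arvo []) []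
  String.ofList lopputulos

-- ===== PORT B =====
structure StB where
  lopputulos : List Char
  sk : PySem.Dict Int (List Char)
  uusi_arvo : Int
  nykyinen : Int
deriving Repr, DecidableEq

-- body of 'for arvo in tuloste[1:]: …'
def pvStepB (st : StB) (arvo : Int) : StB :=
  let lisays := if st.sk.contains arvo then pvHead (st.sk.getD arvo [])
                else pvHead (st.sk.getD st.nykyinen [])
  let sk := st.sk.insert st.uusi_arvo (st.sk.getD st.nykyinen [] ++ lisays)
  ⟨st.lopputulos ++ sk.getD arvo [], sk, st.uusi_arvo + 1, arvo⟩

def muuta_tuloste_tekstiksi_alt (tuloste : List Int) : String :=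
  let sanakirja := pvInitDict
  let nykyinen := PySem.List.pyGetD tuloste 0 0
  let st := (PySem.List.slice tuloste (some 1) none).foldl pvStepB
      ⟨sanakirja.getD nykyinen [], sanakirja, 256, nykyinen⟩
  String.ofList st.lopputulos

-- ===== PRECONDITION & SPEC =====
-- each code at tail position i must be < 257 + i, i.e. already in the dictionary or the next code to be assigned
def ValidFrom (u : Int) (l : List Int) : Prop :=
  ∀ i : Nat, i < l.length → 0 ≤ l.getD i 0 ∧ l.getD i 0 < u + i + 1

-- Pre_ excludes exactly the inputs on which A raises: the empty list (IndexError on tuloste[0])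
-- and lists containing a code never assigned by the decoder (KeyError).
def Pre_muuta_tuloste_tekstiksi (tuloste : List Int) : Prop :=
  tuloste ≠ [] ∧ 0 ≤ tuloste.headI ∧ tuloste.headI < 256 ∧ ValidFrom 256 tuloste.tail

instance (tuloste : List Int) : Decidable (Pre_muuta_tuloste_tekstiksi tuloste) := by
  unfold Pre_muuta_tuloste_tekstiksi ValidFrom; infer_instance

def pvWitness_muuta_tuloste_tekstiksi : List Int := [72, 101, 256, 257]

def Spec_muuta_tuloste_tekstiksi (tuloste : List Int) (out : String) : Prop := out = muuta_tuloste_tekstiksi_alt tuloste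
instance (tuloste : List Int) (out : String) : Decidable (Spec_muuta_tuloste_tekstiksi tuloste out) := by unfold Spec_muuta_tuloste_tekstiksi; infer_instance

-- ===== CLAIM (what is proved, stated in full; the proofs are below) =====
def Claim_equal_muuta_tuloste_tekstiksi : Prop := ∀ (tuloste : List Int), Dom_muuta_tuloste_tekstiksi tuloste → Pre_muuta_tuloste_tekstiksi tuloste → Spec_muuta_tuloste_tekstiksi tuloste (muuta_tuloste_tekstiksi tuloste)

-- ===== LEMMAS AND PROOFS =====

-- dictionary invariant: keys are exactly [0, u) and every stored phrase is nonempty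
def GoodDict (d : PySem.Dict Int (List Char)) (u : Int) : Prop :=
  (∀ k : Int, d.contains k = true ↔ 0 ≤ k ∧ k < u) ∧
  (∀ k : Int, 0 ≤ k → k < u → d.getD k [] ≠ [])

lemma pvHead_append_left (s t : List Char) (hs : s ≠ []) : pvHead (s ++ t) = pvHead s := by
  cases s with
  | nil => exact absurd rfl hs
  | cons a s' =>
    have hpos : (0:Int) ≤ (s'.length : Int) + (t.length : Int) := by positivity
    simp [pvHead, PySem.List.pyGet?, PySem.List.pyIdx?, hpos]

lemma validFrom_cons (u : Int) (c : Int) (rs : List Int) (h : ValidFrom u (c :: rs)) :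
    (0 ≤ c ∧ c ≤ u) ∧ ValidFrom (u + 1) rs := by
  constructor
  · have h0 := h 0 (Nat.succ_pos _)
    rw [List.getD_cons_zero] at h0
    push_cast at h0
    omega
  · intro i hi
    have h1 := h (i + 1) (Nat.succ_lt_succ hi)
    rw [List.getD_cons_succ] at h1
    push_cast at h1 ⊢
    omega

lemma initDict_get? (n : Nat) (k : Int) :
    ((PySem.List.pyRange 0 n 1).foldl (fun d i => d.insert i (pvChr i)) PySem.Dict.empty).get? k
      = if 0 ≤ k ∧ k < n then some (pvChr k) else none := by
  induction n with
  | zero =>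
    simp [PySem.List.pyRange_one_eq_nil (by omega : (0:Int) ≤ 0), PySem.Dict.get?_empty]
  | succ m ih =>
    have hcast : ((m + 1 : Nat) : Int) = (m : Int) + 1 := by push_cast; ring
    rw [hcast, PySem.List.pyRange_one_succ_right (by positivity), List.foldl_append]
    simp only [List.foldl_cons, List.foldl_nil]
    rw [PySem.Dict.get?_insert]
    by_cases hk : k = (m : Int)
    · subst hk; rw [if_pos rfl, if_pos (by omega)]
    · rw [if_neg hk, ih]
      by_cases h1 : 0 ≤ k ∧ k < (m : Int)
      · rw [if_pos h1, if_pos (by omega)]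
      · rw [if_neg h1, if_neg (by omega)]

lemma initDict_get?' (k : Int) :
    pvInitDict.get? k = if 0 ≤ k ∧ k < 256 then some (pvChr k) else none := by
  have h := initDict_get? 256 k
  norm_num at h
  unfold pvInitDict
  exact h

lemma initDict_good : GoodDict pvInitDict 256 := by
  constructor
  · intro k
    rw [PySem.Dict.contains_eq_isSome_get?, initDict_get?' k]
    by_cases h : 0 ≤ k ∧ k < 256
    · rw [if_pos h]; simpa using h
    · rw [if_neg h]; simpa using h
  · intro k h0 h1
    rw [PySem.Dict.getD_eq_get?_getD, initDict_get?' k, if_pos ⟨h0, h1⟩]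
    simp [pvChr]

-- lockstep invariant: running A's loop and B's loop over the same tail from the same
-- dictionary state produces the same dictionary; already-assigned codes keep their phrase;
-- and B's accumulated output is the fold of final-dictionary lookups A performs afterwards.
lemma loop_main (rest : List Int) : ∀ (d : PySem.Dict Int (List Char)) (u nyk : Int)
    (res teksti lisays : List Char),
    GoodDict d u → 0 ≤ nyk → nyk < u → ValidFrom u rest →
    (∀ k : Int, 0 ≤ k → k < u →
      (rest.foldl pvStepA' ⟨teksti, lisays, d, u, nyk⟩).sk.getD k [] = d.getD k []) ∧
    (rest.foldl pvStepB ⟨res, d, u, nyk⟩).lopputulos =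
      rest.foldl (fun acc c => acc ++ (rest.foldl pvStepA' ⟨teksti, lisays, d, u, nyk⟩).sk.getD c []) res := by
  induction rest with
  | nil =>
    intro d u nyk res teksti lisays _ _ _ _
    exact ⟨fun k _ _ => rfl, rfl⟩
  | cons c rs ih =>
    intro d u nyk res teksti lisays hg h0 h1 hv
    obtain ⟨⟨hc0, hcu⟩, hv'⟩ := validFrom_cons u c rs hv
    obtain ⟨hgk, hgv⟩ := hg
    have hnykne : d.getD nyk [] ≠ [] := hgv nyk h0 h1
    -- the new phrase A appends to the dictionary in this step
    set lisays' := pvHead (if d.contains c then d.getD c []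
        else d.getD nyk [] ++ lisays) with hlis
    -- B's lisays for this step equals A's
    have hlisB : (if d.contains c then pvHead (d.getD c [])
        else pvHead (d.getD nyk [])) = lisays' := by
      rw [hlis]
      by_cases hc : d.contains c = true
      · simp [hc]
      · simp only [hc, Bool.false_eq_true, if_false]
        rw [pvHead_append_left _ _ hnykne]
    set v := d.getD nyk [] ++ lisays' with hvdef
    set d' := d.insert u v with hd'
    -- one step of each loop
    have hstepA : pvStepA' ⟨teksti, lisays, d, u, nyk⟩ c
        = ⟨(if d.contains c then d.getD c [] else d.getD nyk [] ++ lisays), lisays', d', u + 1, c⟩ := by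
      simp [pvStepA', hlis, hd', hvdef]
    have hstepB : pvStepB ⟨res, d, u, nyk⟩ c
        = ⟨res ++ d'.getD c [], d', u + 1, c⟩ := by
      simp only [pvStepB, hlisB, hd', hvdef]
    -- invariants after the step
    have hu0 : 0 ≤ u := le_trans h0 (le_of_lt h1)
    have hvne : v ≠ [] := by
      rw [hvdef]; intro h; exact hnykne (List.append_eq_nil_iff.mp h).1
    have hg' : GoodDict d' (u + 1) := by
      constructor
      · intro k
        rw [hd', PySem.Dict.contains_insert, Bool.or_eq_true, hgk k]
        constructor
        · rintro (h | h)
          · have : k = u := by simpa using h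
            omega
          · omega
        · intro hk
          by_cases hku : k = u
          · exact Or.inl (by simpa [hku])
          · exact Or.inr (by omega)
      · intro k hk0 hk1
        rw [hd', PySem.Dict.getD_insert]
        by_cases hku : k = u
        · rw [if_pos hku]; exact hvne
        · rw [if_neg hku]; exact hgv k hk0 (by omega)
    have hcu' : c < u + 1 := by omega
    -- c is a key of d' (either it was in d, or c = u and was just inserted)
    obtain ⟨ihstab, ihres⟩ := ih d' (u + 1) c (res ++ d'.getD c [])
      (if d.contains c then d.getD c [] else d.getD nyk [] ++ lisays) lisays'
      hg' hc0 hcu' hv'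
    constructor
    · intro k hk0 hk1
      simp only [List.foldl_cons]
      rw [hstepA, ihstab k hk0 (by omega)]
      rw [hd', PySem.Dict.getD_insert, if_neg (by omega)]
    · simp only [List.foldl_cons]
      rw [hstepA, hstepB, ihres]
      congr 1
      rw [ihstab c hc0 hcu']

-- A's index loop over range(len(tuloste)-1) is the element loop over the tail
lemma indexLoop_eq_tailLoop (c : Int) (rest : List Int) (s0 : StA) :
    (PySem.List.pyRange 0 (PySem.List.len (c :: rest) - 1) 1).foldl (pvStepA (c :: rest)) s0
      = rest.foldl pvStepA' s0 := by
  have hlen : PySem.List.len (c :: rest) - 1 = (rest.length : Int) := by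
    simp [PySem.List.len_eq]
  rw [hlen]
  have hcongr : (PySem.List.pyRange 0 (rest.length : Int) 1).foldl (pvStepA (c :: rest)) s0
      = (PySem.List.pyRange 0 (rest.length : Int) 1).foldl
          (fun st i => pvStepA' st (PySem.List.pyGetD rest i 0)) s0 := by
    apply PySem.List.foldl_congr_mem
    intro st i hi
    have h0i : 0 ≤ i := (PySem.List.mem_pyRange_one.mp hi).1
    unfold pvStepA
    congr 1
    obtain ⟨n, rfl⟩ := Int.eq_ofNat_of_zero_le h0i
    have : ((n : Int) + 1) = ((n + 1 : Nat) : Int) := by push_cast; ring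
    rw [this, PySem.List.pyGetD_natCast, PySem.List.pyGetD_natCast]
    simp
  rw [hcongr, PySem.List.foldl_pyRange_zero_pyGetD' rest 0 (fun st x => pvStepA' st x) s0]

-- ===== VERDICT (by name: the statement is the Claim_ definition above) =====
set_option maxRecDepth 8192 in
theorem muuta_tuloste_tekstiksi_spec : Claim_equal_muuta_tuloste_tekstiksi := by
  intro tuloste _ hpre
  unfold Spec_muuta_tuloste_tekstiksi
  obtain ⟨hne, hh0, hh256, hv⟩ := hpre
  cases tuloste with
  | nil => exact absurd rfl hne
  | cons c rest =>
    simp only [List.headI, List.tail] at hh0 hh256 hv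
    unfold muuta_tuloste_tekstiksi muuta_tuloste_tekstiksi_alt
    simp only [indexLoop_eq_tailLoop]
    have hnyk : PySem.List.pyGetD (c :: rest) 0 0 = c := by
      have h00 : ((0 : Nat) : Int) = (0 : Int) := rfl
      rw [← h00, PySem.List.pyGetD_natCast]; rfl
    have htail : PySem.List.slice (c :: rest) (some 1) none = rest := by
      rw [PySem.List.slice_from_one]; rfl
    rw [hnyk, htail]
    obtain ⟨hstab, hres⟩ := loop_main rest pvInitDict 256 c
      (pvInitDict.getD c []) (pvInitDict.getD c [])
      (pvHead (pvInitDict.getD c [])) initDict_good hh0 hh256 hv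
    rw [hres]
    congr 1
    rw [List.foldl_cons]
    congr 1
    simpa using hstab c hh0 hh256
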